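-- pv_equiv track=rewrite | github.com/chaosGuppy/HELM-analysis | accuracy.py | _exact_match_up_to_symbol_permutation
-- ===== SOURCE A (Python) =====
-- from itertools import permutations
--
-- def _exact_match_up_to_symbol_permutation(expected: str, completion: str):
--     original_order = ("X", "Y", "Z")
--     for permutation in permutations(original_order):
--         permuted_response = ""
--         for character in completion:
--             if character in original_order:
--                 permuted_response += permutation[original_order.index(character)]
--             else:
--                 permuted_response += character
--         if permuted_response == expected:
--             return True
--     return False
-- ===== SOURCE B (Python) =====
-- def _exact_match_up_to_symbol_permutation(expected: str, completion: str):
--     # One pass: build a partial injective symbol mapping instead of trying all 6 permutations.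
--     if len(completion) != len(expected):
--         return False
--     mapping = {}
--     for c, e in zip(completion, expected):
--         if c in "XYZ":
--             if e not in "XYZ":
--                 return False
--             if c in mapping:
--                 if mapping[c] != e:
--                     return False
--             else:
--                 if e in mapping.values():
--                     return False
--                 mapping[c] = e
--         elif c != e:
--             return False
--     return True
-- ===== Notes on version B (the rewrite author's own statement) =====
-- stated objective: faster
-- what changed: Replaces the try-all-6-permutations loop (which rebuilds the permuted completion string 6 times) by a single pass over zip(completion, expected) maintaining a partial symbol mapping checked for consistency and injectivity.
import Mathlib
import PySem

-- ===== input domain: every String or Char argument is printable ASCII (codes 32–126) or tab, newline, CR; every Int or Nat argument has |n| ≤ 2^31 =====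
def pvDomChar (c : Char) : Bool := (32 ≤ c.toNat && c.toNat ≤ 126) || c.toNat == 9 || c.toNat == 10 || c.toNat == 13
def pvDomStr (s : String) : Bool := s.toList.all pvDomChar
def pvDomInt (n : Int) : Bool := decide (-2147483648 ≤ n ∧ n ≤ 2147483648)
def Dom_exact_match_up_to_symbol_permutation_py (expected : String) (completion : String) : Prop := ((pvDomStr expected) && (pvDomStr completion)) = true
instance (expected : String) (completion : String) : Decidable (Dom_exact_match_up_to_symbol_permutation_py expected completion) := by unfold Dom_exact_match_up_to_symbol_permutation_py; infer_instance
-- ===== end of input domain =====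

-- B replaces A's try-all-six-permutations scan by one pass that builds a partial injective symbol mapping.

-- ===== PORT A =====
-- itertools.permutations(("X","Y","Z")), in itertools order
def pvPerms : List (Char × Char × Char) :=
  [('X','Y','Z'), ('X','Z','Y'), ('Y','X','Z'), ('Y','Z','X'), ('Z','X','Y'), ('Z','Y','X')]

-- 'permutation[original_order.index(character)] if character in original_order else character'
def pvApply (p : Char × Char × Char) (c : Char) : Char :=
  if c = 'X' then p.1 else if c = 'Y' then p.2.1 else if c = 'Z' then p.2.2 else c

def exact_match_up_to_symbol_permutation_py (expected : String) (completion : String) : Bool :=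
  -- for permutation in …: build permuted_response char by char; return True on the first match
  pvPerms.any (fun p =>
    decide ((completion.toList.foldl (fun acc c => acc ++ [pvApply p c]) []) = expected.toList))

-- ===== PORT B =====
def pvSym (c : Char) : Bool := c == 'X' || c == 'Y' || c == 'Z'

-- the zip loop; the dict is an association list in insertion order (new keys append)
def pvGo : List Char → List Char → List (Char × Char) → Bool
  | [], [], _ => true
  | c :: cs, e :: es, m =>
      if pvSym c then
        if !pvSym e then false
        else match m.lookup c with
          | some v => if v = e then pvGo cs es m else false
          | none => if (m.map Prod.snd).contains e then false else pvGo cs es (m ++ [(c, e)])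
      else if c = e then pvGo cs es m else false
  | _, _, _ => false   -- unreachable behind the length guard

def exact_match_up_to_symbol_permutation_py_alt (expected : String) (completion : String) : Bool :=
  if PySem.Str.len completion ≠ PySem.Str.len expected then false
  else pvGo completion.toList expected.toList []

-- ===== PRECONDITION & SPEC =====
def Spec_exact_match_up_to_symbol_permutation_py (expected : String) (completion : String) (out : Bool) : Prop := out = exact_match_up_to_symbol_permutation_py_alt expected completion
instance (expected : String) (completion : String) (out : Bool) : Decidable (Spec_exact_match_up_to_symbol_permutation_py expected completion out) := by unfold Spec_exact_match_up_to_symbol_permutation_py; infer_instance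

-- ===== CLAIM (what is proved, stated in full; the proofs are below) =====
def Claim_equal_exact_match_up_to_symbol_permutation_py : Prop := ∀ (expected : String) (completion : String), Dom_exact_match_up_to_symbol_permutation_py expected completion → Spec_exact_match_up_to_symbol_permutation_py expected completion (exact_match_up_to_symbol_permutation_py expected completion)

-- ===== LEMMAS AND PROOFS =====

theorem pvSym_iff (c : Char) : pvSym c = true ↔ c = 'X' ∨ c = 'Y' ∨ c = 'Z' := by
  simp [pvSym, or_assoc]

-- each permutation maps symbols to symbols
theorem pvApply_sym {p : Char × Char × Char} (hp : p ∈ pvPerms) {c : Char}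
    (hc : pvSym c = true) : pvSym (pvApply p c) = true := by
  rcases (pvSym_iff c).mp hc with h | h | h <;> subst h <;>
    simp [pvPerms] at hp <;> rcases hp with h | h | h | h | h | h <;> subst h <;> decide

-- each permutation is injective on symbols
theorem pvApply_inj {p : Char × Char × Char} (hp : p ∈ pvPerms) {a b : Char}
    (ha : pvSym a = true) (hb : pvSym b = true)
    (h : pvApply p a = pvApply p b) : a = b := by
  rcases (pvSym_iff a).mp ha with h1 | h1 | h1 <;> subst h1 <;>
    rcases (pvSym_iff b).mp hb with h2 | h2 | h2 <;> subst h2 <;>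
    simp [pvPerms] at hp <;> rcases hp with h3 | h3 | h3 | h3 | h3 | h3 <;> subst h3 <;>
    simp_all [pvApply]

-- a non-symbol is fixed by every permutation
theorem pvApply_nonsym (p : Char × Char × Char) {c : Char}
    (hc : pvSym c = false) : pvApply p c = c := by
  rw [pvSym] at hc
  simp only [Bool.or_eq_false_iff, beq_eq_false_iff_ne, ne_eq] at hc
  simp [pvApply, hc.1.1, hc.1.2, hc.2]

def pvInv (m : List (Char × Char)) : Prop :=
  (m.map Prod.fst).Nodup ∧ (m.map Prod.snd).Nodup ∧
  ∀ kv ∈ m, pvSym kv.1 = true ∧ pvSym kv.2 = true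

def pvAgrees (p : Char × Char × Char) (m : List (Char × Char)) : Prop :=
  ∀ kv ∈ m, pvApply p kv.1 = kv.2

theorem pv_lookup_mem : ∀ {m : List (Char × Char)} {k v : Char},
    m.lookup k = some v → (k, v) ∈ m := by
  intro m
  induction m with
  | nil => intro k v h; simp [List.lookup] at h
  | cons a t ih =>
      intro k v h
      cases a with
      | mk a1 a2 =>
          rw [List.lookup] at h
          by_cases hk : k = a1
          · subst hk
            simp only [BEq.rfl] at h
            have hv := Option.some.inj h
            subst hv
            exact List.mem_cons_self ..
          · have hb : (k == a1) = false := by simp [hk]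
            rw [hb] at h
            right; exact ih h

theorem pv_mem_lookup : ∀ {m : List (Char × Char)} {k v : Char},
    (m.map Prod.fst).Nodup → (k, v) ∈ m → m.lookup k = some v := by
  intro m
  induction m with
  | nil => intro k v _ h; simp at h
  | cons a t ih =>
      intro k v hnd h
      cases a with
      | mk a1 a2 =>
          simp only [List.map_cons, List.nodup_cons] at hnd
          rcases List.mem_cons.mp h with heq | hmem
          · obtain ⟨h1, h2⟩ := Prod.mk.injEq .. ▸ heq
            subst h1; subst h2
            simp [List.lookup]
          · have hk : k ≠ a1 := by
              intro he; subst he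
              simp only [List.mem_map] at hnd
              exact hnd.1 ⟨(k, v), hmem, rfl⟩
            have hb : (k == a1) = false := by simp [hk]
            rw [List.lookup, hb]
            exact ih hnd.2 hmem

theorem pv_lookup_none : ∀ {m : List (Char × Char)} {k : Char},
    m.lookup k = none → ∀ v, (k, v) ∉ m := by
  intro m
  induction m with
  | nil => intro k _ v hv; simp at hv
  | cons a t ih =>
      intro k h v hv
      cases a with
      | mk a1 a2 =>
          rw [List.lookup] at h
          by_cases hk : k = a1
          · subst hk; simp at h
          · have hb : (k == a1) = false := by simp [hk]
            rw [hb] at h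
            rcases List.mem_cons.mp hv with hv | hv
            · exact hk (congrArg Prod.fst hv)
            · exact ih h v hv

-- distinct values force equal keys
theorem pv_values_inj : ∀ {m : List (Char × Char)}, (m.map Prod.snd).Nodup →
    ∀ {k1 k2 v : Char}, (k1, v) ∈ m → (k2, v) ∈ m → k1 = k2 := by
  intro m
  induction m with
  | nil => intro _ k1 k2 v h1 _; simp at h1
  | cons a t ih =>
      intro hnd k1 k2 v h1 h2
      cases a with
      | mk a1 a2 =>
          simp only [List.map_cons, List.nodup_cons] at hnd
          rcases List.mem_cons.mp h1 with h1 | h1 <;> rcases List.mem_cons.mp h2 with h2 | h2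
          · rw [Prod.mk.injEq] at h1 h2
            rw [h1.1, h2.1]
          · exfalso
            rw [Prod.mk.injEq] at h1
            exact hnd.1 (h1.2 ▸ (List.mem_map_of_mem (f := Prod.snd) h2))
          · exfalso
            rw [Prod.mk.injEq] at h2
            exact hnd.1 (h2.2 ▸ (List.mem_map_of_mem (f := Prod.snd) h1))
          · exact ih hnd.2 h1 h2

def pvOk (o : Option Char) (v : Char) : Bool :=
  match o with | none => true | some w => v == w

-- a partial injective symbol map extends to one of the six permutations
set_option maxRecDepth 4000 in
theorem pv_ext_core (oX oY oZ : Option Char)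
    (hX : ∀ w, oX = some w → pvSym w = true)
    (hY : ∀ w, oY = some w → pvSym w = true)
    (hZ : ∀ w, oZ = some w → pvSym w = true)
    (hXY : ∀ w, ¬(oX = some w ∧ oY = some w))
    (hXZ : ∀ w, ¬(oX = some w ∧ oZ = some w))
    (hYZ : ∀ w, ¬(oY = some w ∧ oZ = some w)) :
    ∃ p ∈ pvPerms, pvOk oX (pvApply p 'X') = true ∧ pvOk oY (pvApply p 'Y') = true ∧ pvOk oZ (pvApply p 'Z') = true := by
  rcases oX with _ | u <;> rcases oY with _ | v <;> rcases oZ with _ | w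
  all_goals try have hu := (pvSym_iff u).mp (hX u rfl)
  all_goals try have hv' := (pvSym_iff v).mp (hY v rfl)
  all_goals try have hw := (pvSym_iff w).mp (hZ w rfl)
  all_goals try have huv : u ≠ v := fun h => hXY v ⟨by rw [h], rfl⟩
  all_goals try have huw : u ≠ w := fun h => hXZ w ⟨by rw [h], rfl⟩
  all_goals try have hvw : v ≠ w := fun h => hYZ w ⟨by rw [h], rfl⟩
  all_goals try rcases hu with rfl | rfl | rfl
  all_goals try rcases hv' with rfl | rfl | rfl
  all_goals try rcases hw with rfl | rfl | rfl
  all_goals first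
    | exact absurd rfl huv
    | exact absurd rfl huw
    | exact absurd rfl hvw
    | exact ⟨('X','Y','Z'), by decide, by decide⟩
    | exact ⟨('X','Z','Y'), by decide, by decide⟩
    | exact ⟨('Y','X','Z'), by decide, by decide⟩
    | exact ⟨('Y','Z','X'), by decide, by decide⟩
    | exact ⟨('Z','X','Y'), by decide, by decide⟩
    | exact ⟨('Z','Y','X'), by decide, by decide⟩

theorem pv_agrees_iff {p : Char × Char × Char} {m : List (Char × Char)}
    (hInv : pvInv m) :
    pvAgrees p m ↔ (pvOk (m.lookup 'X') (pvApply p 'X') = true ∧ pvOk (m.lookup 'Y') (pvApply p 'Y') = true ∧ pvOk (m.lookup 'Z') (pvApply p 'Z') = true) := by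
  obtain ⟨hk, hv, hs⟩ := hInv
  constructor
  · intro h
    refine ⟨?_, ?_, ?_⟩ <;>
    · show pvOk (List.lookup _ m) _ = true
      cases hl : List.lookup _ m with
      | none => rfl
      | some w => simpa [pvOk] using (h _ (pv_lookup_mem hl))
  · rintro ⟨h1, h2, h3⟩ ⟨k, w⟩ hkw
    have hsym := (hs _ hkw).1
    have hl := pv_mem_lookup hk hkw
    rcases (pvSym_iff k).mp hsym with h | h | h <;> subst h
    · rw [hl] at h1; simpa [pvOk] using h1
    · rw [hl] at h2; simpa [pvOk] using h2
    · rw [hl] at h3; simpa [pvOk] using h3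

theorem pv_extend {m : List (Char × Char)} (hInv : pvInv m) :
    ∃ p ∈ pvPerms, pvAgrees p m := by
  obtain ⟨p, hp, h⟩ := pv_ext_core (m.lookup 'X') (m.lookup 'Y') (m.lookup 'Z')
    (fun w h => (hInv.2.2 _ (pv_lookup_mem h)).2)
    (fun w h => (hInv.2.2 _ (pv_lookup_mem h)).2)
    (fun w h => (hInv.2.2 _ (pv_lookup_mem h)).2)
    (fun w h => by
      have := pv_values_inj hInv.2.1 (pv_lookup_mem h.1) (pv_lookup_mem h.2); simp at this)
    (fun w h => by
      have := pv_values_inj hInv.2.1 (pv_lookup_mem h.1) (pv_lookup_mem h.2); simp at this)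
    (fun w h => by
      have := pv_values_inj hInv.2.1 (pv_lookup_mem h.1) (pv_lookup_mem h.2); simp at this)
  exact ⟨p, hp, (pv_agrees_iff ⟨hInv.1, hInv.2.1, hInv.2.2⟩).mpr h⟩

-- main loop invariant
theorem pvGo_iff : ∀ (cs es : List Char) (m : List (Char × Char)), pvInv m →
    (pvGo cs es m = true ↔ ∃ p ∈ pvPerms, pvAgrees p m ∧ cs.map (pvApply p) = es) := by
  intro cs
  induction cs with
  | nil =>
      intro es m hInv
      cases es with
      | nil =>
          constructor
          · intro _
            obtain ⟨p, hp, hA⟩ := pv_extend hInv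
            exact ⟨p, hp, hA, rfl⟩
          · intro _; rfl
      | cons e es => simp [pvGo]
  | cons c cs ih =>
      intro es m hInv
      cases es with
      | nil => simp [pvGo]
      | cons e es =>
          rw [pvGo]
          by_cases hc : pvSym c = true
          · rw [if_pos hc]
            by_cases he : pvSym e = true
            · simp only [he, Bool.not_true, Bool.false_eq_true, if_false]
              cases hl : m.lookup c with
              | some v =>
                  simp only [hl]
                  by_cases hv : v = e
                  · subst hv
                    rw [if_pos rfl, ih es m hInv]
                    constructor
                    · rintro ⟨p, hp, hA, hmap⟩
                      exact ⟨p, hp, hA, by simp [hmap, hA _ (pv_lookup_mem hl)]⟩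
                    · rintro ⟨p, hp, hA, hmap⟩
                      simp only [List.map_cons, List.cons.injEq] at hmap
                      exact ⟨p, hp, hA, hmap.2⟩
                  · rw [if_neg hv]
                    simp only [Bool.false_eq_true, false_iff]
                    rintro ⟨p, hp, hA, hmap⟩
                    simp only [List.map_cons, List.cons.injEq] at hmap
                    exact hv (((hA _ (pv_lookup_mem hl)).symm.trans hmap.1))
              | none =>
                  simp only [hl]
                  by_cases hcont : (m.map Prod.snd).contains e = true
                  · rw [if_pos hcont]
                    simp only [Bool.false_eq_true, false_iff]
                    rintro ⟨p, hp, hA, hmap⟩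
                    simp only [List.map_cons, List.cons.injEq] at hmap
                    have he' : e ∈ m.map Prod.snd := by simpa using hcont
                    obtain ⟨kv, hkv, hkv2⟩ := List.mem_map.mp he'
                    have h1 : pvApply p kv.1 = e := by rw [hA _ hkv, hkv2]
                    have hk1 : kv.1 = c :=
                      pvApply_inj hp (hInv.2.2 _ hkv).1 hc (h1.trans hmap.1.symm)
                    exact pv_lookup_none hl kv.2 (by rw [← hk1]; exact hkv)
                  · rw [if_neg hcont]
                    have hkeyfresh : c ∉ m.map Prod.fst := by
                      intro hcmem
                      obtain ⟨kv, hkv, hkv1⟩ := List.mem_map.mp hcmem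
                      exact pv_lookup_none hl kv.2 (by rw [← hkv1]; exact hkv)
                    have hvalfresh : e ∉ m.map Prod.snd := by
                      intro hmem; exact hcont (by simpa using hmem)
                    have hInv' : pvInv (m ++ [(c, e)]) := by
                      refine ⟨?_, ?_, ?_⟩
                      · rw [List.map_append]
                        refine List.Nodup.append hInv.1 (List.nodup_singleton _) ?_
                        intro a ha hb
                        simp only [List.map_cons, List.map_nil, List.mem_singleton] at hb
                        subst hb; exact hkeyfresh ha
                      · rw [List.map_append]
                        refine List.Nodup.append hInv.2.1 (List.nodup_singleton _) ?_
                        intro a ha hb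
                        simp only [List.map_cons, List.map_nil, List.mem_singleton] at hb
                        subst hb; exact hvalfresh ha
                      · intro kv hkv
                        rcases List.mem_append.mp hkv with h | h
                        · exact hInv.2.2 _ h
                        · simp at h; subst h; exact ⟨hc, he⟩
                    rw [ih es _ hInv']
                    have hAgrees : ∀ p, pvAgrees p (m ++ [(c, e)]) ↔ pvAgrees p m ∧ pvApply p c = e := by
                      intro p
                      unfold pvAgrees
                      rw [List.forall_mem_append]
                      simp
                    constructor
                    · rintro ⟨p, hp, hA, hmap⟩
                      obtain ⟨hAm, hAce⟩ := (hAgrees p).mp hA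
                      exact ⟨p, hp, hAm, by simp [hmap, hAce]⟩
                    · rintro ⟨p, hp, hA, hmap⟩
                      simp only [List.map_cons, List.cons.injEq] at hmap
                      exact ⟨p, hp, (hAgrees p).mpr ⟨hA, hmap.1⟩, hmap.2⟩
            · have he' : (!pvSym e) = true := by simp at he ⊢; exact he
              rw [if_pos he']
              simp only [Bool.false_eq_true, false_iff]
              rintro ⟨p, hp, hA, hmap⟩
              simp only [List.map_cons, List.cons.injEq] at hmap
              exact he (hmap.1 ▸ pvApply_sym hp hc)
          · rw [if_neg hc]
            have hcf : pvSym c = false := by simpa [Bool.not_eq_true] using hc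
            by_cases hce : c = e
            · subst hce
              rw [if_pos rfl, ih es m hInv]
              constructor
              · rintro ⟨p, hp, hA, hmap⟩
                exact ⟨p, hp, hA, by simp [hmap, pvApply_nonsym p hcf]⟩
              · rintro ⟨p, hp, hA, hmap⟩
                simp only [List.map_cons, List.cons.injEq] at hmap
                exact ⟨p, hp, hA, hmap.2⟩
            · rw [if_neg hce]
              simp only [Bool.false_eq_true, false_iff]
              rintro ⟨p, hp, hA, hmap⟩
              simp only [List.map_cons, List.cons.injEq] at hmap
              exact hce ((pvApply_nonsym p hcf).symm.trans hmap.1)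

theorem pvA_iff (expected completion : String) :
    exact_match_up_to_symbol_permutation_py expected completion = true ↔
      ∃ p ∈ pvPerms, completion.toList.map (pvApply p) = expected.toList := by
  unfold exact_match_up_to_symbol_permutation_py
  rw [List.any_eq_true]
  simp only [decide_eq_true_eq, PySem.List.foldl_append_singleton_eq_map, List.nil_append]

-- ===== VERDICT (by name: the statement is the Claim_ definition above) =====
theorem exact_match_up_to_symbol_permutation_py_spec : Claim_equal_exact_match_up_to_symbol_permutation_py := by
  intro expected completion _
  unfold Spec_exact_match_up_to_symbol_permutation_py exact_match_up_to_symbol_permutation_py_alt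
  have hInv : pvInv [] := ⟨List.nodup_nil, List.nodup_nil, by simp⟩
  by_cases hlen : PySem.Str.len completion ≠ PySem.Str.len expected
  · rw [if_pos hlen]
    rw [← Bool.not_eq_true, pvA_iff]
    rintro ⟨p, _, hmap⟩
    apply hlen
    have := congrArg List.length hmap
    simp only [List.length_map] at this
    simp [PySem.Str.len_eq, this]
  · rw [if_neg hlen]
    rw [Bool.eq_iff_iff, pvA_iff, pvGo_iff completion.toList expected.toList [] hInv]
    constructor
    · rintro ⟨p, hp, hmap⟩
      exact ⟨p, hp, by simp [pvAgrees], hmap⟩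
    · rintro ⟨p, hp, _, hmap⟩
      exact ⟨p, hp, hmap⟩
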